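-- pv_equiv track=rewrite | github.com/junsoopooh/Studying_Algorithm | 3기/week10/junsu/3.py | solution
-- ===== SOURCE A (Python) =====
-- def solution(progresses, speeds):
--     answer = []
--     idx = 0
--     while idx < len(progresses):
--         cnt = 0
--         for i in range(len(progresses)):
--             progresses[i] += speeds[i]
--         while idx < len(progresses):
--             if progresses[idx] >= 100:
--                 idx += 1
--                 cnt += 1
--             else:
--                 break
--         if cnt:
--             answer.append(cnt)
--     return answer
-- ===== SOURCE B (Python) =====
-- def solution(progresses, speeds):
--     answer = []
--     cur = 0
--     cnt = 0
--     for p, s in zip(progresses, speeds):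
--         d = -((p - 100) // s)
--         if d < 1:
--             d = 1
--         if cur < d:
--             if cnt:
--                 answer.append(cnt)
--             cur = d
--             cnt = 1
--         else:
--             cnt += 1
--     if cnt:
--         answer.append(cnt)
--     return answer
-- ===== Notes on version B (the rewrite author's own statement) =====
-- stated objective: alternative
-- what changed: B replaces A's day-by-day simulation (add speeds to every task each day until all are deployed) by computing each task's finish day in closed form with ceiling division and grouping tasks in a single pass by the running maximum finish day; intended as faster (O(n) vs O(n*maxDays)) but a timing run could not measure a ratio, so no speed is claimed.
-- outside the precondition, e.g. on solution([99, 200], [5, -1]): A returns [2], B returns [1, 1]; on solution([150], [0]): A returns [1], B raises ZeroDivisionError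
import Mathlib
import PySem

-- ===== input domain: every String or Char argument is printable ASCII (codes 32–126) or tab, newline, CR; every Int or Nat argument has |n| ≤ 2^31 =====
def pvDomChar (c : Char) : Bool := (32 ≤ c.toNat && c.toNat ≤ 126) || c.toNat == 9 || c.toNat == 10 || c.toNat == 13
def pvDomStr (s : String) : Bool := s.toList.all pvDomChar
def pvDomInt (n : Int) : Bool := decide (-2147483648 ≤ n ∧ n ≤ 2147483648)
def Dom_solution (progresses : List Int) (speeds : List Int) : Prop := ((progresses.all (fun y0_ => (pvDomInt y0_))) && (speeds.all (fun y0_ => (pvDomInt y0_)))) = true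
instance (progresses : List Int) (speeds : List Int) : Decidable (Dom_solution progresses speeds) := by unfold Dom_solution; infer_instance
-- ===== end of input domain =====

-- B replaces A's day-by-day simulation by computing each task's finish day in closed
-- form (ceiling division) and grouping in ONE pass by the running maximum day.
-- Intended as faster, but a timing run could not measure a clean ratio.
-- A mutates `progresses` in place; B does not — the equivalence proved is about the RETURN value.

-- ===== PORT A =====
-- inner `while idx < len(progresses): if progresses[idx] >= 100 ...` as structural
-- recursion over the suffix starting at idx; returns (new idx, cnt)
def solnInner : List Int → Nat → Nat → Nat × Nat
  | [], idx, cnt => (idx, cnt)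
  | p :: tl, idx, cnt => if p ≥ 100 then solnInner tl (idx + 1) (cnt + 1) else (idx, cnt)

-- fuel bound for the outer while loop (each iteration is one day; under Pre_ the
-- total number of days is below this); it only makes the transliteration total
def solnFuel (ps : List Int) : Nat := (ps.map (fun p => (100 - p).toNat + 2)).sum + 1

def solnLoop : Nat → List Int → List Int → Nat → List Int → List Int
  | 0, _, _, _, ans => ans
  | Nat.succ f, ps, ss, idx, ans =>
    if idx < ps.length then
      solnLoop f (List.zipWith (· + ·) ps ss) ss
        (solnInner ((List.zipWith (· + ·) ps ss).drop idx) idx 0).1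
        (if (solnInner ((List.zipWith (· + ·) ps ss).drop idx) idx 0).2 ≠ 0 then
          ans ++ [((solnInner ((List.zipWith (· + ·) ps ss).drop idx) idx 0).2 : Int)]
        else ans)
    else ans

def solution (progresses : List Int) (speeds : List Int) : List Int :=
  solnLoop (solnFuel progresses) progresses speeds 0 []

-- ===== PORT B =====
-- d = -((p - 100) // s); if d < 1: d = 1
def altDay (p s : Int) : Int :=
  let d := -(PySem.Int.floordiv (p - 100) s)
  if d < 1 then 1 else d

def altLoop : List (Int × Int) → Int → Int → List Int → List Int
  | [], _, cnt, ans => if cnt ≠ 0 then ans ++ [cnt] else ans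
  | pr :: tl, cur, cnt, ans =>
    let d := altDay pr.1 pr.2
    if cur < d then altLoop tl d 1 (if cnt ≠ 0 then ans ++ [cnt] else ans)
    else altLoop tl cur (cnt + 1) ans

def solution_alt (progresses : List Int) (speeds : List Int) : List Int :=
  altLoop (progresses.zip speeds) 0 0 []

-- ===== PRECONDITION & SPEC =====
-- Pre_ excludes inputs where speeds is shorter than progresses (A raises IndexError)
-- and inputs with a nonpositive used speed, on which A usually loops forever and its
-- occasional return value is an accident of when the index reaches a regressing task.
def Pre_solution (progresses : List Int) (speeds : List Int) : Prop :=
  progresses.length ≤ speeds.length ∧ ∀ pr ∈ progresses.zip speeds, 0 < pr.2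

instance (progresses : List Int) (speeds : List Int) : Decidable (Pre_solution progresses speeds) := by
  unfold Pre_solution; infer_instance

def pvWitness_solution : List Int × List Int := ([30, 95, 10], [30, 5, 90])

def Spec_solution (progresses : List Int) (speeds : List Int) (out : List Int) : Prop := out = solution_alt progresses speeds
instance (progresses : List Int) (speeds : List Int) (out : List Int) : Decidable (Spec_solution progresses speeds out) := by unfold Spec_solution; infer_instance

-- ===== CLAIM (what is proved, stated in full; the proofs are below) =====
def Claim_equal_solution : Prop := ∀ (progresses : List Int) (speeds : List Int), Dom_solution progresses speeds → Pre_solution progresses speeds → Spec_solution progresses speeds (solution progresses speeds)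

-- ===== LEMMAS AND PROOFS =====

-- the list of per-task finish days
def dayList (ps ss : List Int) : List Int := (ps.zip ss).map (fun pr => altDay pr.1 pr.2)

-- progresses after k days
def pvShift (ps ss : List Int) (k : Int) : List Int := (ps.zip ss).map (fun pr => pr.1 + k * pr.2)

-- strip the leading run of days ≤ c, returning (rest, how many)
def strip (c : Int) : List Int → List Int × Nat
  | [] => ([], 0)
  | d :: tl => if d ≤ c then ((strip c tl).1, (strip c tl).2 + 1) else (d :: tl, 0)

-- A's loop re-expressed over the day list
def dloop : Nat → List Int → Int → List Int → List Int
  | 0, _, _, ans => ans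
  | Nat.succ f, rest, k, ans =>
    if rest = [] then ans
    else dloop f (strip (k + 1) rest).1 (k + 1)
      (if (strip (k + 1) rest).2 ≠ 0 then ans ++ [((strip (k + 1) rest).2 : Int)] else ans)

-- B's loop re-expressed over the day list
def bloop : List Int → Int → Int → List Int → List Int
  | [], _, cnt, ans => if cnt ≠ 0 then ans ++ [cnt] else ans
  | d :: tl, cur, cnt, ans =>
    if cur < d then bloop tl d 1 (if cnt ≠ 0 then ans ++ [cnt] else ans)
    else bloop tl cur (cnt + 1) ans

-- remaining-work measure
def pvS (l : List Int) (k : Int) : Nat := (l.map (fun d => (d - k).toNat)).sum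

theorem altDay_one_le (p s : Int) : 1 ≤ altDay p s := by
  unfold altDay; dsimp only; split <;> omega

theorem altDay_le_iff (p s K : Int) (hs : 0 < s) (hK : 1 ≤ K) :
    altDay p s ≤ K ↔ 100 ≤ p + K * s := by
  have h := PySem.Int.le_floordiv_iff_mul_le (q := -K) (a := p - 100) (b := s) hs
  unfold altDay; dsimp only
  constructor
  · intro h1
    have hd : -(PySem.Int.floordiv (p - 100) s) ≤ K := by split at h1 <;> omega
    have : -K ≤ PySem.Int.floordiv (p - 100) s := by omega
    have := h.mp this
    nlinarith
  · intro h1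
    have : -K * s ≤ p - 100 := by nlinarith
    have := h.mpr this
    split <;> omega

theorem zipWith_shift (ps ss : List Int) (k : Int) :
    List.zipWith (· + ·) (pvShift ps ss k) ss = pvShift ps ss (k + 1) := by
  induction ps generalizing ss with
  | nil => simp [pvShift]
  | cons p tl ih =>
    cases ss with
    | nil => simp [pvShift]
    | cons s stl =>
      simp only [pvShift, List.zip_cons_cons, List.map_cons, List.zipWith_cons_cons] at *
      refine congrArg₂ _ (by ring) (ih stl)

theorem shift_zero (ps ss : List Int) (h : ps.length ≤ ss.length) : pvShift ps ss 0 = ps := by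
  induction ps generalizing ss with
  | nil => simp [pvShift]
  | cons p tl ih =>
    cases ss with
    | nil => simp at h
    | cons s stl =>
      simp only [pvShift, List.zip_cons_cons, List.map_cons] at *
      exact congrArg₂ _ (by ring) (ih stl (by simpa using h))

theorem strip_fst_eq_drop (c : Int) (l : List Int) : (strip c l).1 = l.drop (strip c l).2 := by
  induction l with
  | nil => simp [strip]
  | cons d tl ih =>
    by_cases h : d ≤ c
    · simp [strip, h, ih]
    · simp [strip, h]

theorem strip_snd_le (c : Int) (l : List Int) : (strip c l).2 ≤ l.length := by
  induction l with
  | nil => simp [strip]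
  | cons d tl ih =>
    by_cases h : d ≤ c
    · simp [strip, h]; omega
    · simp [strip, h]

theorem strip_head (c : Int) (l : List Int) :
    (strip c l).1 = [] ∨ ∃ d tl, (strip c l).1 = d :: tl ∧ c < d := by
  induction l with
  | nil => simp [strip]
  | cons d tl ih =>
    by_cases h : d ≤ c
    · simpa [strip, h] using ih
    · exact Or.inr ⟨d, tl, by simp [strip, h], by omega⟩

theorem solnInner_strip (K : Int) (l dl : List Int) (idx cnt : Nat)
    (h : List.Forall₂ (fun a d => a ≥ 100 ↔ d ≤ K) l dl) :
    solnInner l idx cnt = (idx + (strip K dl).2, cnt + (strip K dl).2) := by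
  induction h generalizing idx cnt with
  | nil => simp [solnInner, strip]
  | cons hr htl ih =>
    rename_i a d l' dl'
    by_cases hd : d ≤ K
    · have ha : a ≥ 100 := hr.mpr hd
      simp only [solnInner, strip, if_pos (by omega : a ≥ 100), if_pos hd]
      rw [ih]; simp only [Prod.mk.injEq]; constructor <;> omega
    · have ha : ¬ a ≥ 100 := fun h100 => hd (hr.mp h100)
      simp [solnInner, strip, ha, hd]

theorem forall₂_shift_day (z : List (Int × Int)) (K : Int)
    (hs : ∀ pr ∈ z, 0 < pr.2) (hK : 1 ≤ K) :
    List.Forall₂ (fun a d => a ≥ 100 ↔ d ≤ K)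
      (z.map (fun pr => pr.1 + K * pr.2)) (z.map (fun pr => altDay pr.1 pr.2)) := by
  induction z with
  | nil => simp
  | cons pr tl ih =>
    refine List.Forall₂.cons ?_ (ih (fun q hq => hs q (List.mem_cons_of_mem _ hq)))
    have := altDay_le_iff pr.1 pr.2 K (hs pr (List.mem_cons_self)) hK
    constructor
    · intro h; exact this.mpr (by omega)
    · intro h; have := this.mp h; omega

theorem solnLoop_eq_dloop (f : Nat) (ps ss : List Int) (k : Int) (idx : Nat) (ans : List Int)
    (hlen : ps.length ≤ ss.length) (hs : ∀ pr ∈ ps.zip ss, 0 < pr.2)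
    (hk : 0 ≤ k) (hidx : idx ≤ ps.length) :
    solnLoop f (pvShift ps ss k) ss idx ans = dloop f ((dayList ps ss).drop idx) k ans := by
  induction f generalizing k idx ans with
  | zero => simp [solnLoop, dloop]
  | succ f ih =>
    have hzlen : (ps.zip ss).length = ps.length := by
      simp [List.length_zip]; omega
    have hshiftlen : ∀ m : Int, (pvShift ps ss m).length = ps.length := by
      intro m; simp [pvShift, hzlen]
    have hdaylen : (dayList ps ss).length = ps.length := by simp [dayList, hzlen]
    by_cases hlt : idx < ps.length
    · have hne : (dayList ps ss).drop idx ≠ [] := by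
        intro hemp
        have := congrArg List.length hemp
        simp [hdaylen] at this; omega
      rw [solnLoop, dloop, if_pos (by rw [hshiftlen]; exact hlt), if_neg hne]
      rw [zipWith_shift]
      have hdrop : (pvShift ps ss (k+1)).drop idx
          = ((ps.zip ss).drop idx).map (fun pr => pr.1 + (k+1) * pr.2) := by
        simp [pvShift, List.map_drop]
      have hdropD : (dayList ps ss).drop idx
          = ((ps.zip ss).drop idx).map (fun pr => altDay pr.1 pr.2) := by
        simp [dayList, List.map_drop]
      have hsub : ∀ pr ∈ (ps.zip ss).drop idx, 0 < pr.2 :=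
        fun pr hpr => hs pr (List.mem_of_mem_drop hpr)
      have hF := forall₂_shift_day ((ps.zip ss).drop idx) (k+1) hsub (by omega)
      rw [solnInner_strip (k+1) ((pvShift ps ss (k+1)).drop idx) ((dayList ps ss).drop idx)
        idx 0 (by rw [hdrop, hdropD]; exact hF)]
      set m := (strip (k+1) ((dayList ps ss).drop idx)).2 with hm
      have hstrip1 : (strip (k+1) ((dayList ps ss).drop idx)).1 = (dayList ps ss).drop (idx + m) := by
        rw [strip_fst_eq_drop, List.drop_drop]
      have hmle : m ≤ ps.length - idx := by
        have := strip_snd_le (k+1) ((dayList ps ss).drop idx)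
        simpa [hdaylen, ← hm] using this
      rw [show (0 + m = m) from by omega]
      rw [ih (k+1) (idx + m) _ (by omega) (by omega)]
      rw [hstrip1]
    · have hge : ps.length ≤ idx := by omega
      have hemp : (dayList ps ss).drop idx = [] := by
        apply List.drop_eq_nil_of_le; omega
      rw [solnLoop, dloop, if_neg (by rw [hshiftlen]; omega), if_pos hemp]

theorem altLoop_eq_bloop (z : List (Int × Int)) (cur cnt : Int) (ans : List Int) :
    altLoop z cur cnt ans = bloop (z.map (fun pr => altDay pr.1 pr.2)) cur cnt ans := by
  induction z generalizing cur cnt ans with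
  | nil => simp [altLoop, bloop]
  | cons pr tl ih =>
    simp only [altLoop, bloop, List.map_cons]
    by_cases h : cur < altDay pr.1 pr.2 <;> simp [h, ih]

theorem bloop_append (l : List Int) (cur cnt : Int) (a b : List Int) :
    bloop l cur cnt (a ++ b) = a ++ bloop l cur cnt b := by
  induction l generalizing cur cnt b with
  | nil =>
    by_cases h : cnt ≠ 0 <;> simp [bloop, h]
  | cons d tl ih =>
    by_cases h : cur < d
    · by_cases hc : cnt ≠ 0 <;> simp [bloop, h, hc, List.append_assoc, ih]
    · simp [bloop, h, ih]

theorem bloop_strip (c : Int) (tl : List Int) (cnt : Int) (ans : List Int) (hc : 0 < cnt) :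
    bloop tl c cnt ans =
      (if (strip c tl).1 = [] then ans ++ [cnt + ((strip c tl).2 : Int)]
       else bloop (strip c tl).1 c (cnt + ((strip c tl).2 : Int)) ans) := by
  induction tl generalizing cnt with
  | nil => simp [bloop, strip]; omega
  | cons d tl ih =>
    by_cases h : d ≤ c
    · have hnl : ¬ c < d := by omega
      rw [bloop, if_neg hnl, ih (cnt + 1) (by omega)]
      simp only [strip, if_pos h]
      have : cnt + 1 + ((strip c tl).2 : Int) = cnt + (((strip c tl).2 + 1 : Nat) : Int) := by
        push_cast; ring
      rw [this]
    · simp only [strip, if_neg h]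
      simp [bloop, show ¬ (d :: tl) = [] from by simp]

theorem pvS_mono (l : List Int) (k : Int) : pvS l (k + 1) ≤ pvS l k := by
  induction l with
  | nil => simp [pvS]
  | cons d tl ih =>
    simp only [pvS, List.map_cons, List.sum_cons] at *
    have : (d - (k+1)).toNat ≤ (d - k).toNat := by omega
    omega

theorem pvS_strip (c : Int) (l : List Int) (k : Int) : pvS (strip c l).1 k ≤ pvS l k := by
  induction l with
  | nil => simp [strip]
  | cons d tl ih =>
    by_cases h : d ≤ c
    · simp only [strip, if_pos h]
      refine le_trans ih ?_
      simp [pvS]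
    · simp [strip, h]

theorem dloop_eq_bloop (f : Nat) (rest : List Int) (k : Int) (ans : List Int)
    (hf : pvS rest k < f)
    (hhead : rest = [] ∨ ∃ d tl, rest = d :: tl ∧ k < d) :
    dloop f rest k ans = ans ++ bloop rest k 0 [] := by
  induction f generalizing rest k ans with
  | zero => omega
  | succ f ih =>
    rcases hhead with hemp | ⟨d, tl, hrest, hkd⟩
    · subst hemp; simp [dloop, bloop]
    · subst hrest
      rw [dloop, if_neg (by simp)]
      by_cases hd : d ≤ k + 1
      · have hdk : d = k + 1 := by omega
        simp only [strip, if_pos hd]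
        set m := (strip (k+1) tl).2 with hm
        set tl' := (strip (k+1) tl).1 with htl'
        have hmne : (m + 1 : Nat) ≠ 0 := by omega
        rw [if_pos (by exact_mod_cast hmne)]
        have hSd : pvS tl' (k + 1) < f := by
          have h1 : pvS tl' (k+1) ≤ pvS tl (k+1) := pvS_strip (k+1) tl (k+1)
          have h2 : pvS tl (k+1) ≤ pvS tl k := pvS_mono tl k
          have h3 : pvS (d :: tl) k = (d - k).toNat + pvS tl k := by simp [pvS]
          omega
        rw [ih tl' (k+1) _ hSd (by simpa [htl'] using strip_head (k+1) tl)]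
        -- now compute bloop (d :: tl) k 0 []
        have hb1 : bloop (d :: tl) k 0 [] = bloop tl d 1 [] := by
          rw [bloop, if_pos hkd]; simp
        rw [hb1, hdk, bloop_strip (k+1) tl 1 [] (by omega), ← hm, ← htl']
        rcases (show tl' = [] ∨ ∃ d' ttl, tl' = d' :: ttl ∧ (k+1) < d' from by
            simpa [htl'] using strip_head (k+1) tl) with he | ⟨d', ttl, he, hd'⟩
        · rw [he]
          simp [bloop]
          omega
        · rw [he]
          rw [if_neg (by simp)]
          have h2 : bloop (d' :: ttl) (k+1) (1 + (m : Int)) ([] : List Int)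
              = [1 + (m : Int)] ++ bloop ttl d' 1 [] := by
            rw [bloop, if_pos hd', if_pos (by positivity)]
            rw [show ([] : List Int) ++ [1 + (m : Int)] = [1 + (m : Int)] ++ [] from by simp,
              bloop_append]
          have h3 : bloop (d' :: ttl) (k+1) 0 ([] : List Int) = bloop ttl d' 1 [] := by
            rw [bloop, if_pos hd']; simp
          have hc : ((m + 1 : Nat) : Int) = 1 + (m : Int) := by push_cast; ring
          rw [h2, h3, hc, List.append_assoc]
      · -- idle day
        simp only [strip, if_neg hd]
        rw [if_neg (by simp)]
        have hS : pvS (d :: tl) (k + 1) < pvS (d :: tl) k := by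
          have h2 : pvS tl (k+1) ≤ pvS tl k := pvS_mono tl k
          simp only [pvS, List.map_cons, List.sum_cons] at *
          have : (d - (k+1)).toNat < (d - k).toNat := by omega
          omega
        rw [ih (d :: tl) (k+1) ans (by omega) (Or.inr ⟨d, tl, rfl, by omega⟩)]
        have hL : bloop (d :: tl) k 0 ([] : List Int) = bloop tl d 1 [] := by
          rw [bloop, if_pos hkd]; simp
        have hR : bloop (d :: tl) (k+1) 0 ([] : List Int) = bloop tl d 1 [] := by
          rw [bloop, if_pos (show k + 1 < d by omega)]; simp
        rw [hR, hL]

theorem altDay_toNat_le (p s : Int) (hs : 0 < s) : (altDay p s).toNat ≤ (100 - p).toNat + 1 := by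
  unfold altDay; dsimp only
  split
  · omega
  · rename_i h
    have hq : (-(((100 - p).toNat : Int) + 1)) * s ≤ p - 100 := by
      have h1 : (100 - p : Int) ≤ ((100 - p).toNat : Int) + 1 := by omega
      have h2 : ((100 - p).toNat : Int) + 1 ≤ (((100 - p).toNat : Int) + 1) * s := by
        nlinarith [Int.natCast_nonneg ((100 - p).toNat)]
      nlinarith
    have := (PySem.Int.le_floordiv_iff_mul_le
      (q := -(((100 - p).toNat : Int) + 1)) (a := p - 100) (b := s) hs).mpr hq
    omega

theorem pvS_dayList_lt_fuel (ps ss : List Int)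
    (hlen : ps.length ≤ ss.length) (hs : ∀ pr ∈ ps.zip ss, 0 < pr.2) :
    pvS (dayList ps ss) 0 < solnFuel ps := by
  have key : ∀ (ps ss : List Int), ps.length ≤ ss.length → (∀ pr ∈ ps.zip ss, 0 < pr.2) →
      pvS (dayList ps ss) 0 ≤ (ps.map (fun p => (100 - p).toNat + 2)).sum := by
    intro ps
    induction ps with
    | nil => intro ss _ _; simp [pvS, dayList]
    | cons p tl ih =>
      intro ss hlen hs
      cases ss with
      | nil => simp at hlen
      | cons s stl =>
        simp only [dayList, pvS, List.zip_cons_cons, List.map_cons, List.sum_cons] at *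
        have h1 := altDay_toNat_le p s (hs (p, s) List.mem_cons_self)
        have h2 := ih stl (by simpa using hlen) (fun pr hpr => hs pr (List.mem_cons_of_mem _ hpr))
        have : (altDay p s - 0).toNat = (altDay p s).toNat := by omega
        omega
  have := key ps ss hlen hs
  unfold solnFuel; omega

theorem dayList_head (ps ss : List Int) :
    dayList ps ss = [] ∨ ∃ d tl, dayList ps ss = d :: tl ∧ (0 : Int) < d := by
  cases hz : ps.zip ss with
  | nil => left; simp [dayList, hz]
  | cons pr tlz =>
    right
    exact ⟨altDay pr.1 pr.2, tlz.map (fun pr => altDay pr.1 pr.2), by simp [dayList, hz],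
      by have := altDay_one_le pr.1 pr.2; omega⟩

-- ===== VERDICT (by name: the statement is the Claim_ definition above) =====
theorem solution_spec : Claim_equal_solution := by
  intro ps ss _ hpre
  obtain ⟨hlen, hs⟩ := hpre
  unfold Spec_solution
  have hA : solution ps ss = dloop (solnFuel ps) (dayList ps ss) 0 [] := by
    unfold solution
    have h := solnLoop_eq_dloop (solnFuel ps) ps ss 0 0 [] hlen hs le_rfl (by omega)
    rw [shift_zero ps ss hlen] at h
    simpa using h
  have hB : solution_alt ps ss = bloop (dayList ps ss) 0 0 [] := by
    unfold solution_alt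
    rw [altLoop_eq_bloop]
    simp [dayList]
  rw [hA, hB,
    dloop_eq_bloop (solnFuel ps) (dayList ps ss) 0 []
      (pvS_dayList_lt_fuel ps ss hlen hs) (dayList_head ps ss)]
  simp
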